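-- pv_equiv track=rewrite | github.com/algolab-quantique/CMAI-E91-Students | Part_3_Assignment/utils/assignment_helpers.py | organize_measurements_by_basis
-- ===== SOURCE A (Python) =====
-- def organize_measurements_by_basis(results, alice_bases, bob_bases):
--     """Group measurement results by basis pair for correlation calculation."""
--     unique_alice = list(set(alice_bases))
--     unique_bob = list(set(bob_bases))
--     counts = {}
--     for a in unique_alice:
--         for b in unique_bob:
--             counts[(a, b)] = {'00': 0, '01': 0, '10': 0, '11': 0}
--     for i, result in enumerate(results):
--         a_base = alice_bases[i]
--         b_base = bob_bases[i]
--         if result in counts[(a_base, b_base)]: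
--             counts[(a_base, b_base)][result] += 1
--     return counts
-- ===== SOURCE B (Python) =====
-- def organize_measurements_by_basis(results, alice_bases, bob_bases):
--     """Group measurement results by basis pair for correlation calculation."""
--     triples = [(alice_bases[i], bob_bases[i], results[i]) for i in range(len(results))]
--     return {(a, b): {r: triples.count((a, b, r)) for r in ('00', '01', '10', '11')}
--             for a in set(alice_bases) for b in set(bob_bases)}
-- ===== Notes on version B (the rewrite author's own statement) =====
-- stated objective: alternative
-- what changed: A makes a single counting pass that increments a pre-initialized nested counter dict in place; B never counts incrementally at all: it materializes the list of (alice, bob, result) triples and obtains each of the four counts per basis pair by a separate brute-force list.count scan over that list.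
import Mathlib
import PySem

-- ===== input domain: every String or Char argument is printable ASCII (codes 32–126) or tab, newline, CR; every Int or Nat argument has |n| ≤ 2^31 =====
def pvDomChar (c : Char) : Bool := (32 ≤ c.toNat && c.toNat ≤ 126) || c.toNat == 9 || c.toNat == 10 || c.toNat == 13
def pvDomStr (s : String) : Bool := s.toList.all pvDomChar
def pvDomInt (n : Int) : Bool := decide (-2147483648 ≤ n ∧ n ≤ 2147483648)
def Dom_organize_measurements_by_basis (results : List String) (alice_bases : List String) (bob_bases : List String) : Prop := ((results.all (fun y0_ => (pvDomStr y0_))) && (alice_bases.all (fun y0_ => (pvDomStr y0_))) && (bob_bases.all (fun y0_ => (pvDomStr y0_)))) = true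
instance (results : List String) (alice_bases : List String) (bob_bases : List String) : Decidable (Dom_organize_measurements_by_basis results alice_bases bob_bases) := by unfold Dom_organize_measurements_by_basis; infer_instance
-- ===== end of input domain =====

-- B replaces A's single incrementing pass over a pre-initialized nested counter dict by: build the
-- list of (alice, bob, result) triples once, then obtain every count by a brute-force list.count
-- scan per basis pair and outcome (objective: alternative algorithm — repeated scans, no
-- incremental counting). The ports realize Python's set in first-insertion order.

-- ===== PORT A =====
def pvInnerInit : PySem.Dict String Int :=
  (((PySem.Dict.empty.insert "00" 0).insert "01" 0).insert "10" 0).insert "11" 0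

def organize_measurements_by_basis (results : List String) (alice_bases : List String) (bob_bases : List String) : List (List String × List (String × Int)) :=
  let unique_alice : PySem.Set String := PySem.Set.ofList alice_bases
  let unique_bob : PySem.Set String := PySem.Set.ofList bob_bases
  let counts0 : PySem.Dict (List String) (PySem.Dict String Int) :=
    unique_alice.foldl (fun c a =>
      unique_bob.foldl (fun c b => c.insert [a, b] pvInnerInit) c) PySem.Dict.empty
  let counts1 := (PySem.List.enumerate results).foldl (fun c p =>
    let a_base := PySem.List.pyGetD alice_bases p.1 ""   -- IndexError excluded by Pre_
    let b_base := PySem.List.pyGetD bob_bases p.1 ""     -- IndexError excluded by Pre_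
    if (c.getD [a_base, b_base] PySem.Dict.empty).contains p.2 then
      c.modify [a_base, b_base] PySem.Dict.empty (fun d => d.insert p.2 (d.getD p.2 0 + 1))
    else c) counts0
  counts1.items.map (fun q => (q.1, q.2.items))

-- ===== PORT B =====
def organize_measurements_by_basis_alt (results : List String) (alice_bases : List String) (bob_bases : List String) : List (List String × List (String × Int)) :=
  let triples : List (List String) :=
    (PySem.List.pyRange 0 (PySem.List.len results) 1).map (fun i =>
      [PySem.List.pyGetD alice_bases i "", PySem.List.pyGetD bob_bases i "",
       PySem.List.pyGetD results i ""])   -- IndexError excluded by Pre_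
  (PySem.Set.ofList alice_bases).flatMap (fun a =>
    (PySem.Set.ofList bob_bases).map (fun b =>
      ([a, b], ["00", "01", "10", "11"].map (fun r =>
        (r, (PySem.List.count triples [a, b, r] : Int))))))

-- ===== PRECONDITION & SPEC =====
-- A raises IndexError when results is longer than alice_bases or bob_bases; Pre_ excludes exactly that.
def Pre_organize_measurements_by_basis (results : List String) (alice_bases : List String) (bob_bases : List String) : Prop :=
  results.length ≤ alice_bases.length ∧ results.length ≤ bob_bases.length
instance (results : List String) (alice_bases : List String) (bob_bases : List String) : Decidable (Pre_organize_measurements_by_basis results alice_bases bob_bases) := by unfold Pre_organize_measurements_by_basis; infer_instance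

def pvWitness_organize_measurements_by_basis : List String × List String × List String :=
  (["00", "11", "xy"], ["X", "Z", "X"], ["X", "X", "Z"])

def Spec_organize_measurements_by_basis (results : List String) (alice_bases : List String) (bob_bases : List String) (out : List (List String × List (String × Int))) : Prop := out = organize_measurements_by_basis_alt results alice_bases bob_bases
instance (results : List String) (alice_bases : List String) (bob_bases : List String) (out : List (List String × List (String × Int))) : Decidable (Spec_organize_measurements_by_basis results alice_bases bob_bases out) := by unfold Spec_organize_measurements_by_basis; infer_instance

-- ===== CLAIM (what is proved, stated in full; the proofs are below) =====
def Claim_equal_organize_measurements_by_basis : Prop := ∀ (results : List String) (alice_bases : List String) (bob_bases : List String), Dom_organize_measurements_by_basis results alice_bases bob_bases → Pre_organize_measurements_by_basis results alice_bases bob_bases → Spec_organize_measurements_by_basis results alice_bases bob_bases (organize_measurements_by_basis results alice_bases bob_bases)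

-- ===== LEMMAS AND PROOFS =====

def pvFour : List String := ["00", "01", "10", "11"]

def pvKeys (al bo : List String) : List (List String) :=
  (PySem.Set.ofList al).flatMap (fun a => (PySem.Set.ofList bo).map (fun b => [a, b]))

def pvCnt (results al bo : List String) (k : List String) (r : String) : Int :=
  ((List.range results.length).countP
    (fun i => ([al.getD i "", bo.getD i ""] == k) && (results.getD i "" == r)) : Int)

lemma pvKeys_nodup (al bo : List String) : (pvKeys al bo).Nodup := by
  unfold pvKeys
  rw [List.nodup_flatMap]
  constructor
  · intro a _
    exact (PySem.Set.nodup_ofList bo).map (fun b b' h => by simpa using h)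
  · have h := PySem.Set.nodup_ofList (α := String) al
    refine h.pairwise_of_forall_ne ?_
    intro a a' _ _ hne k hk hk'
    simp only [List.mem_map] at hk hk'
    obtain ⟨b, _, rfl⟩ := hk
    obtain ⟨b', _, h2⟩ := hk'
    simp only [List.cons.injEq, and_true] at h2
    exact hne h2.1.symm

lemma pvMem_pvKeys (al bo : List String) (k : List String) :
    k ∈ pvKeys al bo ↔ ∃ a ∈ al, ∃ b ∈ bo, k = [a, b] := by
  unfold pvKeys
  simp [List.mem_flatMap, PySem.Set.mem_ofList, eq_comm]

lemma pvInner_keys : pvInnerInit.keys = pvFour := by decide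

lemma pvInner_getD : ∀ r ∈ pvFour, pvInnerInit.getD r 0 = 0 := by decide

-- the initial nested fill loop of A: items is the product list, all values pvInnerInit
lemma pvInitLoop (ub : List String) (hub : ub.Nodup) (ua : List String) (hua : ua.Nodup)
    (c : PySem.Dict (List String) (PySem.Dict String Int))
    (hfresh : ∀ a ∈ ua, ∀ b, c.contains [a, b] = false) :
    (ua.foldl (fun c a => ub.foldl (fun c b => c.insert [a, b] pvInnerInit) c) c).items
      = c.items ++ ua.flatMap (fun a => ub.map (fun b => ([a, b], pvInnerInit))) := by
  induction ua generalizing c with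
  | nil => simp
  | cons a ua ih =>
    simp only [List.foldl_cons, List.flatMap_cons]
    have hfa : ∀ b ∈ ub, c.contains [a, b] = false := fun b _ => hfresh a (by simp) b
    have hmapnd : (ub.map (fun b => [a, b])).Nodup :=
      hub.map (fun b b' h => by simpa using h)
    have hitems := PySem.Dict.items_foldl_insert_fresh ub (fun b => [a, b])
      (fun _ => pvInnerInit) c hfa hmapnd
    have hkeys : (ub.foldl (fun c b => c.insert [a, b] pvInnerInit) c).keys
        = c.keys ++ ub.map (fun b => [a, b]) := by
      show ((ub.foldl (fun c b => c.insert [a, b] pvInnerInit) c).items.map Prod.fst) = _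
      rw [hitems]; simp [PySem.Dict.keys, Function.comp]
    rw [ih hua.of_cons _ ?_, hitems]
    · simp
    · intro a' ha' b
      rw [PySem.Dict.contains_eq_decide_mem_keys, hkeys]
      simp only [decide_eq_false_iff_not, List.mem_append, List.mem_map]
      rintro (hc | ⟨b', _, hb⟩)
      · have := hfresh a' (by simp [ha']) b
        rw [PySem.Dict.contains_eq_decide_mem_keys] at this
        simp only [decide_eq_false_iff_not] at this
        exact this hc
      · simp only [List.cons.injEq, and_true] at hb
        exact (List.nodup_cons.mp hua).1 (hb.1 ▸ ha')

-- A's counting loop body (proof-side name for the fold step of port A)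
def pvStep (al bo : List String) (c : PySem.Dict (List String) (PySem.Dict String Int))
    (p : Int × String) : PySem.Dict (List String) (PySem.Dict String Int) :=
  if (c.getD [PySem.List.pyGetD al p.1 "", PySem.List.pyGetD bo p.1 ""] PySem.Dict.empty).contains p.2 then
    c.modify [PySem.List.pyGetD al p.1 "", PySem.List.pyGetD bo p.1 ""] PySem.Dict.empty
      (fun d => d.insert p.2 (d.getD p.2 0 + 1))
  else c

lemma pvLoopA (al bo : List String) (L : List (Int × String))
    (c : PySem.Dict (List String) (PySem.Dict String Int))
    (hL : ∀ p ∈ L, [PySem.List.pyGetD al p.1 "", PySem.List.pyGetD bo p.1 ""] ∈ c.keys)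
    (hinner : ∀ k ∈ c.keys, (c.getD k PySem.Dict.empty).keys = pvFour) :
    (L.foldl (pvStep al bo) c).keys = c.keys
    ∧ (∀ k ∈ c.keys, ((L.foldl (pvStep al bo) c).getD k PySem.Dict.empty).keys = pvFour)
    ∧ ∀ k ∈ c.keys, ∀ r ∈ pvFour,
        ((L.foldl (pvStep al bo) c).getD k PySem.Dict.empty).getD r 0
          = (c.getD k PySem.Dict.empty).getD r 0
            + (L.countP (fun p =>
                ([PySem.List.pyGetD al p.1 "", PySem.List.pyGetD bo p.1 ""] == k)
                  && (p.2 == r)) : Int) := by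
  induction L generalizing c with
  | nil => exact ⟨rfl, fun k hk => hinner k hk, fun k hk r hr => by simp⟩
  | cons p L ih =>
    have hk0 : [PySem.List.pyGetD al p.1 "", PySem.List.pyGetD bo p.1 ""] ∈ c.keys :=
      hL p (by simp)
    have hck0 : c.contains [PySem.List.pyGetD al p.1 "", PySem.List.pyGetD bo p.1 ""] = true :=
      (PySem.Dict.contains_iff_mem_keys c _).mpr hk0
    have hcond : (c.getD [PySem.List.pyGetD al p.1 "", PySem.List.pyGetD bo p.1 ""]
        PySem.Dict.empty).contains p.2 = decide (p.2 ∈ pvFour) := by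
      rw [PySem.Dict.contains_eq_decide_mem_keys, hinner _ hk0]
    by_cases hmem : p.2 ∈ pvFour
    · -- the result string is one of the four keys: increment in place
      have hstep : pvStep al bo c p
          = c.modify [PySem.List.pyGetD al p.1 "", PySem.List.pyGetD bo p.1 ""]
              PySem.Dict.empty (fun d => d.insert p.2 (d.getD p.2 0 + 1)) := by
        unfold pvStep
        rw [hcond]
        simp [hmem]
      generalize hc' : c.modify [PySem.List.pyGetD al p.1 "", PySem.List.pyGetD bo p.1 ""]
          PySem.Dict.empty (fun d => d.insert p.2 (d.getD p.2 0 + 1)) = c' at hstep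
      have hkeys' : c'.keys = c.keys := by
        rw [← hc', PySem.Dict.keys_modify, PySem.Dict.keys_insert_of_contains _ _ hck0]
      have hinnercontains : (c.getD [PySem.List.pyGetD al p.1 "", PySem.List.pyGetD bo p.1 ""]
          PySem.Dict.empty).contains p.2 = true := by
        rw [hcond]; simpa using hmem
      have hinner' : ∀ k ∈ c'.keys, (c'.getD k PySem.Dict.empty).keys = pvFour := by
        intro k hk
        rw [hkeys'] at hk
        by_cases hkk : k = [PySem.List.pyGetD al p.1 "", PySem.List.pyGetD bo p.1 ""]
        · subst hkk
          rw [← hc', PySem.Dict.getD_modify_self,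
            PySem.Dict.keys_insert_of_contains _ _ hinnercontains]
          exact hinner _ hk
        · rw [← hc', PySem.Dict.getD_modify_of_ne _ _ _ hkk]
          exact hinner k hk
      have hL' : ∀ q ∈ L, [PySem.List.pyGetD al q.1 "", PySem.List.pyGetD bo q.1 ""] ∈ c'.keys := by
        intro q hq; rw [hkeys']; exact hL q (by simp [hq])
      obtain ⟨ih1, ih2, ih3⟩ := ih c' hL' hinner'
      rw [List.foldl_cons, hstep]
      refine ⟨by rw [ih1, hkeys'], ?_, ?_⟩
      · intro k hk
        exact ih2 k (hkeys'.symm ▸ hk)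
      · intro k hk r hr
        rw [ih3 k (hkeys'.symm ▸ hk) r hr, List.countP_cons]
        have hbase : (c'.getD k PySem.Dict.empty).getD r 0
            = (c.getD k PySem.Dict.empty).getD r 0
              + if ([PySem.List.pyGetD al p.1 "", PySem.List.pyGetD bo p.1 ""] == k)
                    && (p.2 == r) then (1 : Int) else 0 := by
          by_cases hkk : k = [PySem.List.pyGetD al p.1 "", PySem.List.pyGetD bo p.1 ""]
          · subst hkk
            rw [← hc', PySem.Dict.getD_modify_self, PySem.Dict.getD_insert]
            by_cases hrr : r = p.2
            · simp [hrr]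
            · have h1 : (p.2 == r) = false := beq_eq_false_iff_ne.mpr (Ne.symm hrr)
              simp [hrr, h1]
          · rw [← hc', PySem.Dict.getD_modify_of_ne _ _ _ hkk]
            have h1 : ([PySem.List.pyGetD al p.1 "", PySem.List.pyGetD bo p.1 ""] == k) = false :=
              beq_eq_false_iff_ne.mpr (Ne.symm hkk)
            simp [h1]
        rw [hbase]
        push_cast
        split_ifs <;> ring
    · -- the result string is not a valid key: no change
      have hstep : pvStep al bo c p = c := by
        unfold pvStep
        rw [hcond]
        simp [hmem]
      obtain ⟨ih1, ih2, ih3⟩ := ih c (fun q hq => hL q (by simp [hq])) hinner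
      rw [List.foldl_cons, hstep]
      refine ⟨ih1, ih2, ?_⟩
      intro k hk r hr
      rw [ih3 k hk r hr, List.countP_cons]
      have h1 : (p.2 == r) = false := by
        refine beq_eq_false_iff_ne.mpr ?_
        intro h; exact hmem (h ▸ hr)
      simp [h1]

-- proof-side name for A's initial dict (definitionally the port's term)
def pvCounts0 (al bo : List String) : PySem.Dict (List String) (PySem.Dict String Int) :=
  (PySem.Set.ofList al).foldl (fun c a =>
    (PySem.Set.ofList bo).foldl (fun c b => c.insert [a, b] pvInnerInit) c) PySem.Dict.empty

lemma pvProd_eq {β : Type} (al bo : List String) (f : List String → β) :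
    (pvKeys al bo).map f
      = (PySem.Set.ofList al).flatMap (fun a => (PySem.Set.ofList bo).map (fun b => f [a, b])) := by
  unfold pvKeys
  rw [List.map_flatMap]
  simp [List.map_map, Function.comp_def]

lemma pvCounts0_items (al bo : List String) :
    (pvCounts0 al bo).items = (pvKeys al bo).map (fun k => (k, pvInnerInit)) := by
  unfold pvCounts0
  rw [pvInitLoop (PySem.Set.ofList bo) (PySem.Set.nodup_ofList bo)
    (PySem.Set.ofList al) (PySem.Set.nodup_ofList al) PySem.Dict.empty
    (fun a _ b => PySem.Dict.contains_empty _)]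
  rw [pvProd_eq]
  rfl

lemma pvCounts0_keys (al bo : List String) : (pvCounts0 al bo).keys = pvKeys al bo := by
  show (pvCounts0 al bo).items.map Prod.fst = _
  rw [pvCounts0_items]
  simp [Function.comp_def]

lemma pvCounts0_getD (al bo : List String) (k : List String) (hk : k ∈ pvKeys al bo) :
    (pvCounts0 al bo).getD k PySem.Dict.empty = pvInnerInit :=
  PySem.Dict.getD_of_mem_items _
    (by rw [pvCounts0_items]; exact List.mem_map_of_mem hk)
    (by rw [pvCounts0_keys]; exact pvKeys_nodup al bo) _

lemma pvEnumCount (results al bo : List String) (k : List String) (r : String) :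
    (PySem.List.enumerate results).countP (fun p =>
        ([PySem.List.pyGetD al p.1 "", PySem.List.pyGetD bo p.1 ""] == k) && (p.2 == r))
      = (List.range results.length).countP (fun i =>
          ([al.getD i "", bo.getD i ""] == k) && (results.getD i "" == r)) := by
  rw [PySem.List.enumerate_eq_map_pyRange results "", List.countP_map,
    PySem.List.len_eq, PySem.List.pyRange_zero_nat, List.countP_map]
  apply List.countP_congr
  intro i _
  simp [Function.comp]

lemma pvPortA_eq (results al bo : List String)
    (h1 : results.length ≤ al.length) (h2 : results.length ≤ bo.length) :
    organize_measurements_by_basis results al bo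
      = (pvKeys al bo).map (fun k => (k, pvFour.map (fun r => (r, pvCnt results al bo k r)))) := by
  have hA : organize_measurements_by_basis results al bo
      = ((PySem.List.enumerate results).foldl (pvStep al bo) (pvCounts0 al bo)).items.map
          (fun q => (q.1, q.2.items)) := rfl
  have hL : ∀ p ∈ PySem.List.enumerate results,
      [PySem.List.pyGetD al p.1 "", PySem.List.pyGetD bo p.1 ""] ∈ (pvCounts0 al bo).keys := by
    intro p hp
    rw [pvCounts0_keys, pvMem_pvKeys]
    rw [PySem.List.mem_enumerate_iff] at hp
    obtain ⟨i, hi, rfl⟩ := hp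
    have hia : i < al.length := lt_of_lt_of_le hi h1
    have hib : i < bo.length := lt_of_lt_of_le hi h2
    refine ⟨al.getD i "", ?_, bo.getD i "", ?_, ?_⟩
    · rw [List.getD_eq_getElem al "" hia]; exact List.getElem_mem hia
    · rw [List.getD_eq_getElem bo "" hib]; exact List.getElem_mem hib
    · simp
  have hinner0 : ∀ k ∈ (pvCounts0 al bo).keys,
      ((pvCounts0 al bo).getD k PySem.Dict.empty).keys = pvFour := by
    intro k hk
    rw [pvCounts0_getD al bo k (pvCounts0_keys al bo ▸ hk), pvInner_keys]
  obtain ⟨hk1, hk2, hk3⟩ :=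
    pvLoopA al bo (PySem.List.enumerate results) (pvCounts0 al bo) hL hinner0
  rw [hA, PySem.Dict.items_eq_map_keys _
    (by rw [hk1, pvCounts0_keys]; exact pvKeys_nodup al bo) PySem.Dict.empty,
    hk1, pvCounts0_keys, List.map_map]
  apply List.map_congr_left
  intro k hk
  have hkc : k ∈ (pvCounts0 al bo).keys := by rw [pvCounts0_keys]; exact hk
  simp only [Function.comp]
  refine congrArg (fun z => (k, z)) ?_
  rw [PySem.Dict.items_eq_map_keys _ (by rw [hk2 k hkc]; decide) (0 : Int), hk2 k hkc]
  apply List.map_congr_left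
  intro r hr
  refine congrArg (fun z => (r, z)) ?_
  rw [hk3 k hkc r hr, pvCounts0_getD al bo k hk, pvInner_getD r hr,
    pvEnumCount results al bo k r]
  simp [pvCnt]

-- B's brute-force count over the triple list equals pvCnt
lemma pvTriplesCount (results al bo : List String) (a b r : String) :
    (PySem.List.count
        ((PySem.List.pyRange 0 (PySem.List.len results) 1).map (fun i =>
          [PySem.List.pyGetD al i "", PySem.List.pyGetD bo i "", PySem.List.pyGetD results i ""]))
        [a, b, r] : Int)
      = pvCnt results al bo [a, b] r := by
  unfold pvCnt
  rw [PySem.List.count_eq, PySem.List.len_eq, PySem.List.pyRange_zero_nat, List.map_map,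
    List.count_eq_countP, List.countP_map]
  congr 1
  apply List.countP_congr
  intro i _
  simp [Function.comp, PySem.List.pyGetD_natCast, List.cons_beq_cons, and_assoc]

lemma pvPortB_eq (results al bo : List String) :
    organize_measurements_by_basis_alt results al bo
      = (PySem.Set.ofList al).flatMap (fun a => (PySem.Set.ofList bo).map (fun b =>
          ([a, b], pvFour.map (fun r => (r, pvCnt results al bo [a, b] r))))) := by
  unfold organize_measurements_by_basis_alt
  simp only [pvTriplesCount results al bo]
  rfl

-- ===== VERDICT (by name: the statement is the Claim_ definition above) =====
theorem organize_measurements_by_basis_spec : Claim_equal_organize_measurements_by_basis := by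
  intro results al bo _hdom hpre
  unfold Spec_organize_measurements_by_basis
  rw [pvPortA_eq results al bo hpre.1 hpre.2, pvPortB_eq, pvProd_eq]
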